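-- pv_equiv track=rewrite | github.com/yarenbasoglu/Multi-Ship-Logistics-Optimization-with-TabuSearch | old files/düşük maliyet.py | intersection_window
-- ===== SOURCE A (Python) =====
-- from typing import Dict, List, Tuple, Optional, Set
--
-- demand_day: Dict[str, int] = {
--     "L1": 5,  "L2": 7,
--     "L3": 12, "L4": 13,
--     "L5": 20, "L6": 22,
--     "L7": 28, "L8": 30,
--     "L9": 9,  "L10": 16,
--     "L11": 18, "L12": 25,
--     "L13": 6,  "L14": 31,
-- }
--
-- TIME_TOLERANCE = 2  # talep günü ±2
--
-- def window_for_loc(loc: str) -> Tuple[int, int]: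
--     d = demand_day[loc]
--     return (d - TIME_TOLERANCE, d + TIME_TOLERANCE)
--
-- def intersection_window(locs: Tuple[str, ...]) -> Optional[Tuple[int, int]]:
--     lo = -10**9
--     hi = 10**9
--     for loc in locs:
--         a, b = window_for_loc(loc)
--         lo = max(lo, a)
--         hi = min(hi, b)
--     return (lo, hi) if lo <= hi else None
-- ===== SOURCE B (Python) =====
-- from typing import Dict, List, Tuple, Optional, Set
--
-- demand_day: Dict[str, int] = {
--     "L1": 5,  "L2": 7,
--     "L3": 12, "L4": 13,
--     "L5": 20, "L6": 22,
--     "L7": 28, "L8": 30,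
--     "L9": 9,  "L10": 16,
--     "L11": 18, "L12": 25,
--     "L13": 6,  "L14": 31,
-- }
--
-- TIME_TOLERANCE = 2  # talep günü ±2
--
-- def intersection_window(locs: Tuple[str, ...]) -> Optional[Tuple[int, int]]:
--     days = sorted(demand_day[loc] for loc in locs)
--     if not days:
--         return (-10**9, 10**9)
--     lo = days[-1] - TIME_TOLERANCE
--     hi = days[0] + TIME_TOLERANCE
--     return (lo, hi) if lo <= hi else None
-- ===== Notes on version B (the rewrite author's own statement) =====
-- stated objective: alternative
-- what changed: Replaces A's running max/min fold with sorting the demand days once and reading the intersection window off the two ends of the sorted list (its last element is the largest demand day, its head the smallest).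
import Mathlib
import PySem

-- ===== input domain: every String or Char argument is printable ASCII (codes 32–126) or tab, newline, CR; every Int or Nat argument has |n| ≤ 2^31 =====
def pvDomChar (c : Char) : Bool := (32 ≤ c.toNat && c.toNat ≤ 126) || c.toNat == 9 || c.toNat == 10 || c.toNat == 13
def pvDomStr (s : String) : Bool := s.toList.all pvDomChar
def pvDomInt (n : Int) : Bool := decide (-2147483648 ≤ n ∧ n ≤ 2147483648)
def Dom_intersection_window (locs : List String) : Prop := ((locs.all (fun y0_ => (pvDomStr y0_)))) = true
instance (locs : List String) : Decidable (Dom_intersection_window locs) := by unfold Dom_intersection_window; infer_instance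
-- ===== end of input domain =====

-- B replaces A's running max/min fold by sorting the demand days once and reading the
-- window off the two ends of the sorted list (objective: alternative).

-- shared module constant: demand_day
def demandDay : PySem.Dict String Int := PySem.Dict.mk
  [("L1", 5), ("L2", 7), ("L3", 12), ("L4", 13), ("L5", 20), ("L6", 22), ("L7", 28),
   ("L8", 30), ("L9", 9), ("L10", 16), ("L11", 18), ("L12", 25), ("L13", 6), ("L14", 31)]

-- ===== PORT A =====
-- window_for_loc: none = KeyError
def windowForLoc (loc : String) : Option (Int × Int) :=
  (demandDay.get? loc).map (fun d => (d - 2, d + 2))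

-- A's for-loop over locs with running (lo, hi); none propagates a KeyError
def aLoop : List String → Int → Int → Option (Int × Int)
  | [], lo, hi => some (lo, hi)
  | loc :: rest, lo, hi =>
    match windowForLoc loc with
    | none => none
    | some (a, b) => aLoop rest (max lo a) (min hi b)

def intersection_window (locs : List String) : Option (Int × Int) :=
  match aLoop locs (-(10:Int)^9) ((10:Int)^9) with
  | none => none
  | some (lo, hi) => if lo ≤ hi then some (lo, hi) else none

-- ===== PORT B =====
-- the generator (demand_day[loc] for loc in locs); none = KeyError
def daysOf : List String → Option (List Int)
  | [] => some []
  | loc :: rest =>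
    match demandDay.get? loc, daysOf rest with
    | some d, some ds => some (d :: ds)
    | _, _ => none

def intersection_window_alt (locs : List String) : Option (Int × Int) :=
  match daysOf locs with
  | none => none
  | some ds =>
    match PySem.List.sorted ds (fun x => x) false with
    | [] => some (-(10:Int)^9, (10:Int)^9)
    | d :: s =>
      let lo := (d :: s).getLast (List.cons_ne_nil d s) - 2   -- days[-1] - TIME_TOLERANCE
      let hi := d + 2                                          -- days[0] + TIME_TOLERANCE
      if lo ≤ hi then some (lo, hi) else none

-- ===== PRECONDITION & SPEC =====
-- Pre_ excludes exactly the inputs containing a location not in demand_day, on which A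
-- raises KeyError (and B raises the same KeyError).
def Pre_intersection_window (locs : List String) : Prop :=
  (locs.all (fun l => demandDay.contains l)) = true
instance (locs : List String) : Decidable (Pre_intersection_window locs) := by
  unfold Pre_intersection_window; infer_instance

def pvWitness_intersection_window : List String := ["L1", "L3"]

def Spec_intersection_window (locs : List String) (out : Option (Int × Int)) : Prop := out = intersection_window_alt locs
instance (locs : List String) (out : Option (Int × Int)) : Decidable (Spec_intersection_window locs out) := by unfold Spec_intersection_window; infer_instance

-- ===== CLAIM (what is proved, stated in full; the proofs are below) =====
def Claim_equal_intersection_window : Prop := ∀ (locs : List String), Dom_intersection_window locs → Pre_intersection_window locs → Spec_intersection_window locs (intersection_window locs)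

-- ===== LEMMAS AND PROOFS =====

theorem pre_daysOf (locs : List String) (h : Pre_intersection_window locs) :
    ∃ days, daysOf locs = some days := by
  induction locs with
  | nil => exact ⟨[], rfl⟩
  | cons loc rest ih =>
    unfold Pre_intersection_window at h ih
    simp [List.all_cons] at h
    obtain ⟨h1, h2⟩ := h
    obtain ⟨ds, hds⟩ := ih (by simpa using h2)
    rw [PySem.Dict.contains_eq_isSome_get?] at h1
    cases hg : demandDay.get? loc with
    | none => rw [hg] at h1; simp at h1
    | some d => exact ⟨d :: ds, by simp [daysOf, hg, hds]⟩

-- a value looked up in a literal dict is one of its stored values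
theorem mk_get?_mem {l : List (String × Int)} {s : String} {d : Int}
    (h : (PySem.Dict.mk l).get? s = some d) : d ∈ l.map Prod.snd := by
  induction l with
  | nil => simp [PySem.Dict.get?] at h
  | cons p rest ih =>
    rw [show (p : String × Int) = (p.1, p.2) from rfl, PySem.Dict.get?_mk_cons] at h
    by_cases hc : (p.1 == s) = true
    · rw [if_pos hc] at h
      obtain rfl := Option.some.inj h
      simp
    · rw [if_neg hc] at h
      exact List.mem_cons_of_mem _ (ih h)

-- every value stored in demand_day lies in [5, 31]
theorem demandDay_val_bound (s : String) (d : Int) (h : demandDay.get? s = some d) :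
    5 ≤ d ∧ d ≤ 31 := by
  have hm := mk_get?_mem (h := by simpa [demandDay] using h)
  simp at hm
  omega

theorem daysOf_bound (locs : List String) (days : List Int)
    (h : daysOf locs = some days) : ∀ d ∈ days, 5 ≤ d ∧ d ≤ 31 := by
  induction locs generalizing days with
  | nil => simp [daysOf] at h; subst h; simp
  | cons loc rest ih =>
    simp only [daysOf] at h
    cases hg : demandDay.get? loc with
    | none => rw [hg] at h; simp at h
    | some d0 =>
      rw [hg] at h
      cases hr : daysOf rest with
      | none => rw [hr] at h; simp at h
      | some ds =>
        rw [hr] at h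
        obtain rfl : d0 :: ds = days := Option.some.inj h
        intro d hd
        rcases List.mem_cons.mp hd with h1 | h2
        · rw [h1]; exact demandDay_val_bound loc d0 hg
        · exact ih ds hr d h2

-- A's loop, expressed as two folds over the day list
theorem aLoop_eq (locs : List String) (days : List Int) (h : daysOf locs = some days) :
    ∀ lo hi, aLoop locs lo hi =
      some (days.foldl (fun l d => max l (d - 2)) lo,
            days.foldl (fun h d => min h (d + 2)) hi) := by
  induction locs generalizing days with
  | nil => simp [daysOf] at h; subst h; intro lo hi; simp [aLoop]
  | cons loc rest ih =>
    simp only [daysOf] at h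
    cases hg : demandDay.get? loc with
    | none => rw [hg] at h; simp at h
    | some d =>
      rw [hg] at h
      cases hr : daysOf rest with
      | none => rw [hr] at h; simp at h
      | some ds =>
        rw [hr] at h
        obtain rfl : d :: ds = days := Option.some.inj h
        intro lo hi
        simp only [aLoop, windowForLoc, hg, Option.map_some, List.foldl_cons]
        exact ih ds hr (max lo (d - 2)) (min hi (d + 2))

theorem fold_max_shift (t : List Int) (a : Int) :
    t.foldl (fun l d => max l (d - 2)) (a - 2) = t.foldl max a - 2 := by
  induction t generalizing a with
  | nil => rfl
  | cons y t ih =>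
    simp only [List.foldl_cons]
    have : max (a - 2) (y - 2) = max a y - 2 := by omega
    rw [this, ih]

theorem fold_min_shift (t : List Int) (a : Int) :
    t.foldl (fun h d => min h (d + 2)) (a + 2) = t.foldl min a + 2 := by
  induction t generalizing a with
  | nil => rfl
  | cons y t ih =>
    simp only [List.foldl_cons]
    have : min (a + 2) (y + 2) = min a y + 2 := by omega
    rw [this, ih]

-- in a ≤-sorted list every element is at most the last one
theorem pairwise_le_getLast (L : List Int) (hL : L.Pairwise (· ≤ ·)) (hne : L ≠ []) :
    ∀ y ∈ L, y ≤ L.getLast hne := by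
  induction L with
  | nil => exact absurd rfl hne
  | cons x t ih =>
    intro y hy
    cases t with
    | nil => simp at hy; simp [hy, List.getLast]
    | cons z u =>
      rw [List.getLast_cons (List.cons_ne_nil z u)]
      rcases List.mem_cons.mp hy with rfl | hyt
      · have hx := (List.pairwise_cons.mp hL).1
        have hz : y ≤ z := hx z (by simp)
        have := ih (List.pairwise_cons.mp hL).2 (List.cons_ne_nil z u) z (by simp)
        omega
      · exact ih (List.pairwise_cons.mp hL).2 (List.cons_ne_nil z u) y hyt

-- ===== VERDICT (by name: the statement is the Claim_ definition above) =====
theorem intersection_window_spec : Claim_equal_intersection_window := by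
  intro locs _ hpre
  unfold Spec_intersection_window
  obtain ⟨days, hdays⟩ := pre_daysOf locs hpre
  unfold intersection_window intersection_window_alt
  rw [hdays, aLoop_eq locs days hdays]
  dsimp only
  cases days with
  | nil => simp [PySem.List.sorted]
  | cons x t =>
    have hb := daysOf_bound locs (x :: t) hdays
    have hx := hb x (by simp)
    -- A's folds with the huge sentinels reduce to plain running max / min over the days
    simp only [List.foldl_cons]
    have hmax : max (-(10:Int)^9) (x - 2) = x - 2 := by omega
    have hmin : min ((10:Int)^9) (x + 2) = x + 2 := by omega
    rw [hmax, hmin, fold_max_shift, fold_min_shift]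
    -- B's sorted list is nonempty
    cases hs : PySem.List.sorted (x :: t) (fun x => x) false with
    | nil => exact absurd ((PySem.List.sorted_eq_nil_iff (x :: t) (fun x => x) false).mp hs) (List.cons_ne_nil x t)
    | cons m s =>
      -- head of sorted = running min, last of sorted = running max
      have hperm : (m :: s).Perm (x :: t) := hs ▸ PySem.List.sorted_perm (x :: t) (fun x => x) false
      have hpw : (m :: s).Pairwise (· ≤ ·) := by
        have := PySem.List.sorted_pairwise (xs := x :: t) (key := fun x => x)
        rw [hs] at this; exact this
      have hmem_iff : ∀ y : Int, y ∈ m :: s ↔ y ∈ x :: t := fun y => hperm.mem_iff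
      -- last = t.foldl max x
      have hMx := PySem.List.max?_id_cons (x := x) (t := t)
      have hMxmem : t.foldl max x ∈ x :: t := PySem.List.max?_mem hMx
      have hMxmax : ∀ y ∈ x :: t, y ≤ t.foldl max x := PySem.List.max?_isMax hMx
      have hlast_mem : (m :: s).getLast (List.cons_ne_nil m s) ∈ x :: t :=
        (hmem_iff _).mp (List.getLast_mem _)
      have hlast_ge : t.foldl max x ≤ (m :: s).getLast (List.cons_ne_nil m s) :=
        pairwise_le_getLast (m :: s) hpw (List.cons_ne_nil m s) _ ((hmem_iff _).mpr hMxmem)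
      have hlast : (m :: s).getLast (List.cons_ne_nil m s) = t.foldl max x :=
        le_antisymm (hMxmax _ hlast_mem) hlast_ge
      -- head = t.foldl min x
      have hMn := PySem.List.min?_id_cons (x := x) (t := t)
      have hMnmem : t.foldl min x ∈ x :: t := PySem.List.min?_mem hMn
      have hMnmin : ∀ y ∈ x :: t, t.foldl min x ≤ y := PySem.List.min?_isMin hMn
      have hm_mem : m ∈ x :: t := (hmem_iff m).mp (by simp)
      have hm_le : ∀ y ∈ x :: t, m ≤ y := PySem.List.key_head_sorted_le (x :: t) (fun x => x) hs
      have hhead : m = t.foldl min x := le_antisymm (hm_le _ hMnmem) (hMnmin m hm_mem)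
      dsimp only
      rw [hlast, ← hhead]
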